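-- pv_equiv track=rewrite | github.com/pipi9baby/MlbFinalProject | dynamic.py | FindCloset1Seq
-- ===== SOURCE A (Python) =====
-- from collections import defaultdict
--
-- def dynamicString(str1, str2):
-- 	count = 0
-- 	for i in range(0,len(str1)):
-- 		if str1[i] == str2[i]:
-- 			count += 1
-- 		else:
-- 			return count
-- 	return count
--
-- def FindCloset1Seq(seq1, DataSeq):
-- 	simDict = defaultdict(list)
-- 	for seq2 in DataSeq:
-- 		returnInt = dynamicString(seq1, seq2)
-- 		simDict[returnInt].append(seq2)
--
-- 	#找最大的20個
-- 	items = list(simDict.keys())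
--
-- 	minIndex = min(items)
-- 	return simDict[minIndex][0]
-- ===== SOURCE B (Python) =====
-- def FindCloset1Seq(seq1, DataSeq):
--     best_len = None
--     best_seq = None
--     for seq2 in DataSeq:
--         d = 0
--         for c1, c2 in zip(seq1, seq2):
--             if c1 != c2:
--                 break
--             d += 1
--         if best_len is None or d < best_len:
--             best_len = d
--             best_seq = seq2
--     if best_seq is None:
--         raise ValueError("FindCloset1Seq: empty DataSeq")
--     return best_seq
-- ===== Notes on version B (the rewrite author's own statement) =====
-- stated objective: simpler
-- what changed: Replaced the defaultdict grouping plus min-over-keys with a single running-min scan keeping (best_len, best_seq), strict '<' preserving the first-element tie-break; the char comparison loop uses zip so it stops at the shorter string instead of indexing past the end.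
import Mathlib
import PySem

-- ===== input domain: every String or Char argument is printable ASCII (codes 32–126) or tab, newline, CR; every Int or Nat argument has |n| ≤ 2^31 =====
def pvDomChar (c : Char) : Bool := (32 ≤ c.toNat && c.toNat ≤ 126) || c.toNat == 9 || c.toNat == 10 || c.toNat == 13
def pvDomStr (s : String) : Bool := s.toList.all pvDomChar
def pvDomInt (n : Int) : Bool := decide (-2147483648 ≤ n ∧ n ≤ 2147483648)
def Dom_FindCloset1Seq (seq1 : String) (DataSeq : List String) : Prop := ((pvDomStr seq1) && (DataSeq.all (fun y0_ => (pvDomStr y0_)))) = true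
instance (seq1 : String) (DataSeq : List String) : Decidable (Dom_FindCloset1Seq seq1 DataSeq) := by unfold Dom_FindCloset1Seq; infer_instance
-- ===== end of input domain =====

-- B replaces A's defaultdict grouping + min over keys with a single running-min scan (simpler, O(1) extra state).

-- ===== PORT A =====
-- dynamicString: loop i over str1's indices comparing str1[i]/str2[i]; none = IndexError (str2[i] out of range)
def dynamicStringA : List Char → List Char → Int → Option Int
  | [], _, count => some count
  | _ :: _, [], _ => none
  | c1 :: t1, c2 :: t2, count =>
      if c1 = c2 then dynamicStringA t1 t2 (count + 1) else some count

def FindCloset1Seq (seq1 : String) (DataSeq : List String) : String :=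
  let simDict? : Option (PySem.Dict Int (List String)) :=
    DataSeq.foldl
      (fun acc seq2 => acc.bind fun d =>
        (dynamicStringA seq1.toList seq2.toList 0).map fun k => d.modify k [] (· ++ [seq2]))
      (some PySem.Dict.empty)
  match simDict? with
  | none => ""            -- IndexError inside the loop: excluded by Pre_
  | some simDict =>
    match PySem.List.min? simDict.keys (fun x => x) with
    | none => ""          -- ValueError of min([]) on empty DataSeq: excluded by Pre_
    | some minIndex =>
      match simDict.getD minIndex [] with
      | s :: _ => s
      | [] => ""          -- unreachable: minIndex is a key

-- ===== PORT B =====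
-- the inner zip loop of Source B: common-prefix counter d
def prefLenB : List Char → List Char → Int → Int
  | c1 :: t1, c2 :: t2, d => if c1 = c2 then prefLenB t1 t2 (d + 1) else d
  | _, _, d => d

def FindCloset1Seq_alt (seq1 : String) (DataSeq : List String) : String :=
  let best :=
    DataSeq.foldl
      (fun (best : Option (Int × String)) seq2 =>
        let d := prefLenB seq1.toList seq2.toList 0
        match best with
        | none => some (d, seq2)
        | some (bl, bs) => if d < bl then some (d, seq2) else some (bl, bs))
      none
  match best with
  | none => ""            -- ValueError raised by Source B on empty DataSeq: excluded by Pre_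
  | some (_, bs) => bs

-- ===== PRECONDITION & SPEC =====
-- Pre_ excludes exactly the inputs where A raises: empty DataSeq (ValueError from min([])) and
-- any DataSeq containing a strict prefix of seq1 (IndexError from str2[i]).
def Pre_FindCloset1Seq (seq1 : String) (DataSeq : List String) : Prop :=
  DataSeq ≠ [] ∧ ∀ s ∈ DataSeq,
    ¬ (s.toList.length < seq1.toList.length ∧ s.toList <+: seq1.toList)
instance (seq1 : String) (DataSeq : List String) : Decidable (Pre_FindCloset1Seq seq1 DataSeq) := by
  unfold Pre_FindCloset1Seq; infer_instance

def pvWitness_FindCloset1Seq : String × List String := ("ab", ["cd", "ax"])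

def Spec_FindCloset1Seq (seq1 : String) (DataSeq : List String) (out : String) : Prop := out = FindCloset1Seq_alt seq1 DataSeq
instance (seq1 : String) (DataSeq : List String) (out : String) : Decidable (Spec_FindCloset1Seq seq1 DataSeq out) := by unfold Spec_FindCloset1Seq; infer_instance

-- ===== CLAIM (what is proved, stated in full; the proofs are below) =====
def Claim_equal_FindCloset1Seq : Prop := ∀ (seq1 : String) (DataSeq : List String), Dom_FindCloset1Seq seq1 DataSeq → Pre_FindCloset1Seq seq1 DataSeq → Spec_FindCloset1Seq seq1 DataSeq (FindCloset1Seq seq1 DataSeq)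
-- ===== LEMMAS AND PROOFS =====

theorem dynA_eq_prefLenB (s1 s2 : List Char) (c : Int)
    (h : ¬ (s2.length < s1.length ∧ s2 <+: s1)) :
    dynamicStringA s1 s2 c = some (prefLenB s1 s2 c) := by
  induction s1 generalizing s2 c with
  | nil => cases s2 <;> rfl
  | cons a t1 ih =>
    cases s2 with
    | nil => exact absurd ⟨by simp, List.nil_prefix⟩ h
    | cons b t2 =>
      by_cases hab : a = b
      · subst hab
        simp only [dynamicStringA, prefLenB]
        exact ih t2 (c + 1) (fun ⟨hl, hp⟩ =>
          h ⟨by simpa using hl, (List.cons_prefix_cons).2 ⟨rfl, hp⟩⟩)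
      · simp [dynamicStringA, prefLenB, hab]

theorem optfold_eq (seq1 : String) :
    ∀ (l : List String) (d : PySem.Dict Int (List String)),
    (∀ s ∈ l, dynamicStringA seq1.toList s.toList 0 = some (prefLenB seq1.toList s.toList 0)) →
    l.foldl
      (fun acc seq2 => acc.bind fun d =>
        (dynamicStringA seq1.toList seq2.toList 0).map fun k => d.modify k [] (· ++ [seq2]))
      (some d)
    = some (l.foldl
        (fun d seq2 => d.modify (prefLenB seq1.toList seq2.toList 0) [] (· ++ [seq2])) d) := by
  intro l
  induction l with
  | nil => intro d _; rfl
  | cons x t ih =>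
    intro d hg
    simp only [List.foldl_cons, Option.bind_some, hg x (by simp), Option.map_some]
    exact ih _ (fun s hs => hg s (by simp [hs]))

theorem bfold_char (f : String → Int) :
    ∀ (l : List String), l ≠ [] → ∃ m h,
      m ∈ l.map f ∧ (∀ y ∈ l, m ≤ f y) ∧
      (l.filter (fun s => f s == m)).head? = some h ∧
      l.foldl
        (fun (best : Option (Int × String)) s =>
          match best with
          | none => some (f s, s)
          | some (bl, bs) => if f s < bl then some (f s, s) else some (bl, bs))
        none = some (m, h) := by
  intro l
  induction l using List.reverseRecOn with
  | nil => intro h; exact absurd rfl h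
  | append_singleton l x ih =>
    intro _
    rcases eq_or_ne l [] with rfl | hl
    · exact ⟨f x, x, by simp, by simp, by simp, rfl⟩
    · obtain ⟨m, h, hmem, hmin, hhead, hfold⟩ := ih hl
      rw [List.foldl_append, hfold]
      by_cases hlt : f x < m
      · refine ⟨f x, x, by simp, ?_, ?_, by simp [hlt]⟩
        · intro y hy
          rcases List.mem_append.1 hy with hy | hy
          · exact le_of_lt (lt_of_lt_of_le hlt (hmin y hy))
          · simp at hy; subst hy; exact le_refl _
        · have hnil : l.filter (fun s => f s == f x) = [] := by
            rw [List.filter_eq_nil_iff]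
            intro s hs hsx
            have := hmin s hs
            simp at hsx
            omega
          simp [List.filter_append, hnil]
      · refine ⟨m, h, by rw [List.map_append]; exact List.mem_append_left _ hmem, ?_, ?_,
          by simp [hlt]⟩
        · intro y hy
          rcases List.mem_append.1 hy with hy | hy
          · exact hmin y hy
          · simp at hy; subst hy; omega
        · rw [List.filter_append, List.head?_append, hhead]; rfl

theorem FindCloset1Seq_main (seq1 : String) (DataSeq : List String)
    (hpre : Pre_FindCloset1Seq seq1 DataSeq) :
    FindCloset1Seq seq1 DataSeq = FindCloset1Seq_alt seq1 DataSeq := by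
  obtain ⟨hne, hnp⟩ := hpre
  have hdyn : ∀ s ∈ DataSeq, dynamicStringA seq1.toList s.toList 0
      = some (prefLenB seq1.toList s.toList 0) :=
    fun s hs => dynA_eq_prefLenB _ _ _ (hnp s hs)
  obtain ⟨m, h, hmem, hmin, hhead, hfold⟩ :=
    bfold_char (fun s => prefLenB seq1.toList s.toList 0) DataSeq hne
  -- the dict built by A's loop
  have hD :
      DataSeq.foldl
        (fun d seq2 => d.modify (prefLenB seq1.toList seq2.toList 0) [] (· ++ [seq2]))
        PySem.Dict.empty
      = (DataSeq.map (fun s => ((prefLenB seq1.toList s.toList 0 : Int), s))).foldl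
          (fun d p => d.modify p.1 [] (· ++ [p.2])) PySem.Dict.empty := by
    rw [List.foldl_map]
  have hgetD : ∀ k : Int,
      (DataSeq.foldl
        (fun d seq2 => d.modify (prefLenB seq1.toList seq2.toList 0) [] (· ++ [seq2]))
        PySem.Dict.empty).getD k []
      = DataSeq.filter (fun s => prefLenB seq1.toList s.toList 0 == k) := by
    intro k
    rw [hD, PySem.Dict.getD_foldl_modify_append]
    simp [List.filter_map, List.map_map, Function.comp_def]
  have hkeys : ∀ k : Int,
      (k ∈ (DataSeq.foldl
        (fun d seq2 => d.modify (prefLenB seq1.toList seq2.toList 0) [] (· ++ [seq2]))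
        PySem.Dict.empty).keys)
      ↔ k ∈ DataSeq.map (fun s => prefLenB seq1.toList s.toList 0) := by
    intro k
    rw [hD, PySem.Dict.keys_foldl_modify_key]
    simp [PySem.Set.mem_update, PySem.Dict.keys_empty, List.map_map, Function.comp_def]
  unfold FindCloset1Seq FindCloset1Seq_alt
  rw [optfold_eq seq1 DataSeq PySem.Dict.empty hdyn, hfold]
  dsimp only
  rcases hmq : PySem.List.min? (DataSeq.foldl
      (fun d seq2 => d.modify (prefLenB seq1.toList seq2.toList 0) [] (· ++ [seq2]))
      PySem.Dict.empty).keys (fun x => x) with _ | m'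
  · -- min? = none impossible: keys nonempty
    exfalso
    rw [PySem.List.min?_eq_none_iff] at hmq
    obtain ⟨s, hs⟩ := List.exists_mem_of_ne_nil DataSeq hne
    have hk := (hkeys (prefLenB seq1.toList s.toList 0)).2 (List.mem_map_of_mem hs)
    rw [hmq] at hk
    simp at hk
  · rw [hmq]
    dsimp only
    have hm'mem : m' ∈ DataSeq.map (fun s => prefLenB seq1.toList s.toList 0) :=
      (hkeys m').1 (PySem.List.min?_mem hmq)
    have hm'min : ∀ y ∈ DataSeq.map (fun s => prefLenB seq1.toList s.toList 0), m' ≤ y :=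
      fun y hy => PySem.List.min?_isMin hmq y ((hkeys y).2 hy)
    have hmm : m' = m := by
      obtain ⟨s, hs, hfs⟩ := List.mem_map.1 hm'mem
      exact le_antisymm (hm'min m hmem) (hfs ▸ hmin s hs)
    subst hmm
    rw [hgetD]
    obtain ⟨t, ht⟩ := (List.head?_eq_some_iff).1 hhead
    rw [ht]


theorem FindCloset1Seq_spec : Claim_equal_FindCloset1Seq :=
  fun seq1 DataSeq _ hpre => FindCloset1Seq_main seq1 DataSeq hpre
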